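-- pv_equiv track=rewrite | github.com/claraabk/IF669-Programming-Challenges | 5th list/q2.py | alteracao_numero
-- ===== SOURCE A (Python) =====
-- def alteracao_numero (digitos) :
--
--     # Transformando o número em string p/ formar uma lista
--     digitos = str(digitos)
--
--     #Criando a recursão
--     if len(str(digitos)) >= 8 :
--         return digitos
--
--     else:
--         # Criando a lista
--         lista_digitos = list(digitos)
--
--         # Lista vazia p/ o resultado
--         lista_resultado = []
--         # Lista com os números aparecendo uma vez p/ fazer a contagem
--         lista_unica = list(set(lista_digitos))
--
--         #P/ cada número que aparece na lista única, contabilize na lista de dígito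
--         for i in range(len(lista_unica)):
--             #Somando a string p/ formar os pares
--             novo_num = str(lista_digitos.count(lista_unica[i])) + lista_unica[i]
--             #Apendando na lista do resultado
--             lista_resultado.append(novo_num)
--
--         #Ordenando do menor para o maior
--         resultado_ordenado = sorted(lista_resultado)
--         #Transformando em string novamente
--         resultado_ordenado = ''.join(resultado_ordenado)
--
--         return alteracao_numero(resultado_ordenado)
-- ===== SOURCE B (Python) =====
-- def alteracao_numero(digitos):
--     digitos = str(digitos)
--     # iterate instead of recursing; one counting pass per round instead of
--     # an O(n^2) count() per distinct digit
--     while len(digitos) < 8: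
--         contagem = {}
--         for ch in digitos:
--             contagem[ch] = contagem.get(ch, 0) + 1
--         digitos = ''.join(sorted(str(c) + ch for ch, c in contagem.items()))
--     return digitos
-- ===== Notes on version B (the rewrite author's own statement) =====
-- stated objective: alternative
-- what changed: Replaces the tail recursion with an explicit while loop and replaces the per-distinct-digit list.count scan (set + count per distinct element, O(n^2) per round) with a single dictionary counting pass per round.
-- outside the precondition, e.g. on alteracao_numero(''): A raises RecursionError, B does not finish within the time limit; on alteracao_numero('22'): A raises RecursionError, B does not finish within the time limit
import Mathlib
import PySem

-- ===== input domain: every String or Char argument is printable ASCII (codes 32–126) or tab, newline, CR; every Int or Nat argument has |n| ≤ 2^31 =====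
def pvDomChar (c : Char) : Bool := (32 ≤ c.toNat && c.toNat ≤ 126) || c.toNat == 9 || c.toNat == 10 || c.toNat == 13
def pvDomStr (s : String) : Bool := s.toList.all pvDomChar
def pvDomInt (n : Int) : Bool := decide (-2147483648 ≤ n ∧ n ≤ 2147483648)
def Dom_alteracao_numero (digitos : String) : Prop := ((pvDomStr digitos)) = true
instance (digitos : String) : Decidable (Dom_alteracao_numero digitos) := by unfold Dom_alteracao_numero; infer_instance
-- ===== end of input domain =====

-- B replaces A's tail recursion by a while loop and A's per-distinct-element list.count scan by
-- one dictionary counting pass per round (objective: alternative decomposition, same results).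
-- Both ports model the unbounded recursion/loop with the same fuel (1000, far above the ≤ 9
-- rounds any terminating run takes); Pre_ excludes the two inputs on which the Python A recurses
-- forever (RecursionError).

-- ===== PORT A =====
-- one recursion body of A (the else branch): build count+digit tokens over list(set(...)),
-- sort them, join them
def alteracaoStepA (digitos : String) : String :=
  PySem.Str.join ""
    (PySem.List.sorted
      ((PySem.List.pyRange 0 ((PySem.Set.ofList digitos.toList).length : Int) 1).foldl
        (fun acc i =>
          acc ++ [String.ofList (PySem.Int.toChars ((digitos.toList.count (PySem.List.pyGetD (PySem.Set.ofList digitos.toList) i ' ') : Int)) ++ [PySem.List.pyGetD (PySem.Set.ofList digitos.toList) i ' '])])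
        [])
      (fun x => x) false)

def alteracaoRecA (fuel : Nat) (digitos : String) : String :=
  match fuel with
  | 0 => digitos
  | n + 1 =>
    if (8 : Int) ≤ PySem.Str.len digitos then digitos
    else alteracaoRecA n (alteracaoStepA digitos)

def alteracao_numero (digitos : String) : String := alteracaoRecA 1000 digitos

-- ===== PORT B =====
-- one loop body of B: count every char in one dict pass, make count+char tokens from the items,
-- sort, join
def alteracaoStepB (digitos : String) : String :=
  PySem.Str.join ""
    (PySem.List.sorted
      ((digitos.toList.foldl (fun d ch => d.insert ch (d.getD ch 0 + 1)) PySem.Dict.empty).items.map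
        (fun p => String.ofList (PySem.Int.toChars p.2 ++ [p.1])))
      (fun x => x) false)

def alteracaoLoopB (fuel : Nat) (digitos : String) : String :=
  match fuel with
  | 0 => digitos
  | n + 1 =>
    if PySem.Str.len digitos < (8 : Int) then alteracaoLoopB n (alteracaoStepB digitos)
    else digitos

def alteracao_numero_alt (digitos : String) : String := alteracaoLoopB 1000 digitos

-- ===== PRECONDITION & SPEC =====
-- Pre_ excludes exactly "" and "22", the only inputs on which A recurses forever (each is a fixed
-- point of the transformation with length < 8) and so raises RecursionError; B loops forever there.
def Pre_alteracao_numero (digitos : String) : Prop := digitos ≠ "" ∧ digitos ≠ "22"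
instance (digitos : String) : Decidable (Pre_alteracao_numero digitos) := by unfold Pre_alteracao_numero; infer_instance
def pvWitness_alteracao_numero : String := "123"

def Spec_alteracao_numero (digitos : String) (out : String) : Prop := out = alteracao_numero_alt digitos
instance (digitos : String) (out : String) : Decidable (Spec_alteracao_numero digitos out) := by unfold Spec_alteracao_numero; infer_instance

-- ===== CLAIM (what is proved, stated in full; the proofs are below) =====
def Claim_equal_alteracao_numero : Prop := ∀ (digitos : String), Dom_alteracao_numero digitos → Pre_alteracao_numero digitos → Spec_alteracao_numero digitos (alteracao_numero digitos)

-- ===== LEMMAS AND PROOFS =====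

-- the two round bodies produce the same string
theorem stepA_eq_stepB (s : String) : alteracaoStepA s = alteracaoStepB s := by
  unfold alteracaoStepA alteracaoStepB
  rw [PySem.Dict.foldl_insert_getD_add_one_eq_counter, PySem.Dict.items_counter]
  rw [PySem.List.foldl_pyRange_zero_pyGetD' (PySem.Set.ofList s.toList) ' '
        (fun acc u => acc ++ [String.ofList (PySem.Int.toChars ((s.toList.count u : Int)) ++ [u])]) []]
  rw [PySem.List.foldl_append_singleton_eq_map, List.map_map]
  rfl

-- equal fuel, equal bodies: the recursion of A and the loop of B agree
theorem recA_eq_loopB (fuel : Nat) (s : String) : alteracaoRecA fuel s = alteracaoLoopB fuel s := by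
  induction fuel generalizing s with
  | zero => rfl
  | succ n ih =>
    unfold alteracaoRecA alteracaoLoopB
    by_cases h : (8 : Int) ≤ PySem.Str.len s
    · rw [if_pos h, if_neg (by omega)]
    · rw [if_neg h, if_pos (by omega), stepA_eq_stepB, ih]

-- ===== VERDICT (by name: the statement is the Claim_ definition above) =====
theorem alteracao_numero_spec : Claim_equal_alteracao_numero := by
  intro digitos _ _
  unfold Spec_alteracao_numero alteracao_numero alteracao_numero_alt
  exact recA_eq_loopB 1000 digitos
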